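-- pv_equiv track=rewrite | github.com/SujeethJinesh/LatentWire | scripts/analyze_svamp32_token_span_dictionary_probe.py | _make_outer_folds
-- ===== SOURCE A (Python) =====
-- def _make_outer_folds(n: int, spec: str) -> list[list[int]]:
--     if spec == "loo":
--         return [[idx] for idx in range(n)]
--     fold_count = int(spec)
--     if fold_count < 2 or fold_count > n:
--         raise ValueError(f"outer_folds must be 'loo' or an integer in 2..{n}")
--     folds = [[] for _ in range(fold_count)]
--     for idx in range(n):
--         folds[idx % fold_count].append(idx)
--     return folds
-- ===== SOURCE B (Python) =====
-- def _make_outer_folds(n: int, spec: str) -> list[list[int]]: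
--     if spec == "loo":
--         fold_count = n
--     else:
--         fold_count = int(spec)
--         if fold_count < 2 or fold_count > n:
--             raise ValueError(f"outer_folds must be 'loo' or an integer in 2..{n}")
--     return [list(range(k, n, fold_count)) for k in range(fold_count)]
-- ===== Notes on version B (the rewrite author's own statement) =====
-- stated objective: idiomatic
-- what changed: B unifies 'loo' with the k-fold case (loo becomes fold_count = n) and builds every fold directly as a strided range(k, n, fold_count), replacing both A's singleton comprehension and its per-index pass dispatching idx into folds[idx % fold_count].
import Mathlib
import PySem

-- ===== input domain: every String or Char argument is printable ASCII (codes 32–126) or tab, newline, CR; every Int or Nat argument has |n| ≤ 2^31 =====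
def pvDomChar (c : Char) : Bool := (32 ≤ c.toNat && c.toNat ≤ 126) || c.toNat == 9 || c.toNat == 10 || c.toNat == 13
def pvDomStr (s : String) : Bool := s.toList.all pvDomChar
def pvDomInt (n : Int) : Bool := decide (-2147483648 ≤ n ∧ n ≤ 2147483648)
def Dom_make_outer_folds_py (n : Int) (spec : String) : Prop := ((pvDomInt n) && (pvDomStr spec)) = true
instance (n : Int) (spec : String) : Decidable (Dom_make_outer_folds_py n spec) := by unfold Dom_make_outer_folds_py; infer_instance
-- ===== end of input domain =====

-- B unifies 'loo' with the k-fold case (fold_count = n) and builds every fold directly as a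
-- strided range(k, n, fold_count), replacing A's singleton comprehension and its per-index
-- modulo dispatch (idiomatic rewrite, same cost).

-- ===== PORT A =====
-- Python A: loo branch returns [[idx] for idx in range(n)]; else fold_count = int(spec);
-- ValueError (excluded by Pre_) if unparsable or fold_count < 2 or fold_count > n;
-- else distribute range(n) into folds by idx % fold_count.
def make_outer_folds_py (n : Int) (spec : String) : List (List Int) :=
  if spec = "loo" then
    (PySem.List.pyRange 0 n 1).map (fun idx => [idx])
  else
    match PySem.Int.ofStr? spec with
    | none => []          -- int(spec) raises ValueError: outside Pre_
    | some fold_count =>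
      if fold_count < 2 ∨ n < fold_count then []   -- explicit raise ValueError: outside Pre_
      else
        ((PySem.List.pyRange 0 n 1).foldl
          (fun folds idx => folds.modify (PySem.Int.mod idx fold_count).toNat (· ++ [idx]))
          ((PySem.List.pyRange 0 fold_count 1).map (fun _ => ([] : List Int))))

-- ===== PORT B =====
-- Source B: fold_count = n if spec == "loo" (no validation there), else int(spec) validated to 2..n;
-- one strided comprehension [list(range(k, n, fold_count)) for k in range(fold_count)].
def make_outer_folds_py_alt (n : Int) (spec : String) : List (List Int) :=
  let fold_count? : Option Int :=
    if spec = "loo" then some n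
    else
      match PySem.Int.ofStr? spec with
      | none => none                                     -- int(spec) raises ValueError: outside Pre_
      | some fc => if fc < 2 ∨ n < fc then none else some fc   -- raise ValueError: outside Pre_
  match fold_count? with
  | none => []
  | some fold_count =>
    (PySem.List.pyRange 0 fold_count 1).map (fun k => PySem.List.pyRange k n fold_count)

-- ===== PRECONDITION & SPEC =====
-- Pre_ excludes exactly the inputs on which A raises ValueError: spec neither "loo" nor an
-- int-parsable string, or the parsed fold_count outside 2..n.
def Pre_make_outer_folds_py (n : Int) (spec : String) : Prop :=
  spec = "loo" ∨
    ((PySem.Int.ofStr? spec).isSome = true ∧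
      2 ≤ (PySem.Int.ofStr? spec).getD 0 ∧ (PySem.Int.ofStr? spec).getD 0 ≤ n)
instance (n : Int) (spec : String) : Decidable (Pre_make_outer_folds_py n spec) := by
  unfold Pre_make_outer_folds_py; infer_instance
def pvWitness_make_outer_folds_py : Int × String := (7, "3")
def Spec_make_outer_folds_py (n : Int) (spec : String) (out : List (List Int)) : Prop := out = make_outer_folds_py_alt n spec
instance (n : Int) (spec : String) (out : List (List Int)) : Decidable (Spec_make_outer_folds_py n spec out) := by unfold Spec_make_outer_folds_py; infer_instance

-- ===== CLAIM (what is proved, stated in full; the proofs are below) =====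
def Claim_equal_make_outer_folds_py : Prop := ∀ (n : Int) (spec : String), Dom_make_outer_folds_py n spec → Pre_make_outer_folds_py n spec → Spec_make_outer_folds_py n spec (make_outer_folds_py n spec)

-- ===== LEMMAS AND PROOFS =====

-- range(k, n, n) is the singleton [k] when 0 ≤ k < n.
lemma stride_singleton (n k : Int) (hk : 0 ≤ k) (hkn : k < n) :
    PySem.List.pyRange k n n = [k] := by
  have hn : 0 < n := by omega
  rw [PySem.List.pyRange_of_pos _ _ hn, if_pos hkn]
  have hc : (n - k + n - 1) / n = 1 := by
    have h1 : n - k + n - 1 = (n - k - 1) + n * 1 := by ring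
    rw [h1, Int.add_mul_ediv_left _ _ (by omega : n ≠ 0),
      Int.ediv_eq_zero_of_lt (by omega) (by omega)]
    omega
  rw [hc]
  simp

-- range(k, m+1, fc) extends range(k, m, fc) by [m] exactly when m % fc = k.
lemma stride_succ (fc k m : Int) (hfc : 0 < fc) (hk : 0 ≤ k) (hkfc : k < fc) (hm : 0 ≤ m) :
    PySem.List.pyRange k (m + 1) fc =
      PySem.List.pyRange k m fc ++ (if PySem.Int.mod m fc = k then [m] else []) := by
  rw [PySem.Int.mod_eq_emod_of_pos hfc]
  rcases lt_or_ge m k with hmk | hkm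
  · -- m < k: both ranges empty, m % fc = m ≠ k
    have h1 : ¬ k < m := by omega
    have h2 : ¬ k < m + 1 := by omega
    have hmod : m % fc = m := Int.emod_eq_of_lt hm (by omega)
    rw [PySem.List.pyRange_of_pos _ _ hfc, PySem.List.pyRange_of_pos _ _ hfc,
      if_neg h1, if_neg h2, hmod, if_neg (by omega)]
    simp
  · -- k ≤ m
    obtain ⟨q, r, hqr, hr0, hrfc, hq0⟩ :
        ∃ q r : Int, m - k = fc * q + r ∧ 0 ≤ r ∧ r < fc ∧ 0 ≤ q :=
      ⟨(m - k) / fc, (m - k) % fc, (Int.ediv_add_emod (m - k) fc).symm,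
        Int.emod_nonneg _ (by omega), Int.emod_lt_of_pos _ hfc,
        Int.ediv_nonneg (by omega) (by omega)⟩
    have hmul : fc * (q + 1) = fc * q + fc := by ring
    have hqle : q ≤ fc * q := le_mul_of_one_le_left hq0 (by omega)
    have hmod : m % fc = k + r - (if k + r < fc then 0 else fc) := by
      have : m = (k + r - (if k + r < fc then 0 else fc)) + fc * (if k + r < fc then q else q + 1) := by
        split_ifs <;> omega
      rw [this, Int.add_mul_emod_self_left]
      split_ifs with h
      · exact Int.emod_eq_of_lt (by omega) (by omega)
      · exact Int.emod_eq_of_lt (by omega) (by omega)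
    have hfne : fc ≠ 0 := by omega
    rw [PySem.List.pyRange_of_pos _ _ hfc, PySem.List.pyRange_of_pos _ _ hfc,
      if_pos (show k < m + 1 by omega)]
    by_cases hrz : r = 0
    · -- m % fc = k: one new element m = k + fc * q
      have hmodk : m % fc = k := by rw [hmod]; split_ifs <;> omega
      rw [if_pos hmodk]
      have hc2 : (m + 1 - k + fc - 1) / fc = q + 1 := by
        have : m + 1 - k + fc - 1 = r + fc * (q + 1) := by omega
        rw [this, Int.add_mul_ediv_left _ _ hfne, Int.ediv_eq_zero_of_lt hr0 hrfc]; omega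
      by_cases hkm' : k < m
      · have hc1 : (m - k + fc - 1) / fc = q := by
          have : m - k + fc - 1 = (fc - 1) + fc * q := by omega
          rw [this, Int.add_mul_ediv_left _ _ hfne,
            Int.ediv_eq_zero_of_lt (by omega) (by omega)]; omega
        rw [if_pos hkm', hc1, hc2]
        have : (q + 1).toNat = q.toNat + 1 := by omega
        rw [this, List.range_succ]
        simp only [List.map_append, List.map_cons, List.map_nil, List.append_cancel_left_eq]
        have hq1 : (q.toNat : Int) = q := by omega
        have hm' : k + fc * (q.toNat : Int) = m := by rw [hq1]; omega
        rw [hm']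
      · -- k = m, so q = 0: LHS one element [k], RHS [] ++ [m]
        have hkm2 : k = m := by omega
        have hq' : q = 0 := by omega
        rw [if_neg hkm', hc2, hq']
        simp [hkm2]
    · -- m % fc ≠ k: no new element
      have hmodk : m % fc ≠ k := by rw [hmod]; split_ifs <;> omega
      rw [if_neg hmodk]
      have hkm' : k < m := by omega
      have hc1 : (m - k + fc - 1) / fc = q + 1 := by
        have : m - k + fc - 1 = (r - 1) + fc * (q + 1) := by omega
        rw [this, Int.add_mul_ediv_left _ _ hfne,
          Int.ediv_eq_zero_of_lt (by omega) (by omega)]; omega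
      have hc2 : (m + 1 - k + fc - 1) / fc = q + 1 := by
        have : m + 1 - k + fc - 1 = r + fc * (q + 1) := by
          omega
        rw [this, Int.add_mul_ediv_left _ _ hfne, Int.ediv_eq_zero_of_lt hr0 hrfc]; omega
      rw [if_pos hkm', hc1, hc2]
      simp

-- modify at index r of a map over pyRange 0 fc 1 hits exactly the element r.
lemma modify_map_pyRange (fc r : Int) (g : Int → List Int) (f : List Int → List Int)
    (hr0 : 0 ≤ r) (hrfc : r < fc) :
    ((PySem.List.pyRange 0 fc 1).map g).modify r.toNat f =
      (PySem.List.pyRange 0 fc 1).map (fun k => if k = r then f (g k) else g k) := by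
  apply List.ext_getElem
  · simp [List.length_modify]
  · intro j h1 h2
    rw [List.getElem_modify]
    have hlen : j < (PySem.List.pyRange 0 fc 1).length := by
      simpa [List.length_modify] using h1
    rw [List.getElem_map, List.getElem_map, PySem.List.getElem_pyRange_one 0 fc j hlen]
    have hc : r.toNat = j ↔ (0 : Int) + (j : Int) = r := by omega
    by_cases hj : r.toNat = j
    · rw [if_pos hj, if_pos (hc.mp hj)]
    · rw [if_neg hj, if_neg (fun h => hj (hc.mpr h))]

-- loop invariant: after folding range(m), fold k holds exactly range(k, m, fc).
lemma loopA_inv (fc : Int) (hfc : 0 < fc) (mN : Nat) :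
    (PySem.List.pyRange 0 (mN : Int) 1).foldl
        (fun folds idx => folds.modify (PySem.Int.mod idx fc).toNat (· ++ [idx]))
        ((PySem.List.pyRange 0 fc 1).map (fun _ => ([] : List Int)))
      = (PySem.List.pyRange 0 fc 1).map (fun k => PySem.List.pyRange k (mN : Int) fc) := by
  induction mN with
  | zero =>
    rw [PySem.List.pyRange_zero_nat]
    apply List.map_congr_left
    intro k hk
    rw [PySem.List.mem_pyRange_one] at hk
    rw [PySem.List.pyRange_of_pos _ _ hfc, if_neg (by omega)]
    simp
  | succ m ih =>
    have hsplit : PySem.List.pyRange 0 ((m + 1 : Nat) : Int) 1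
        = PySem.List.pyRange 0 (m : Int) 1 ++ [(m : Int)] := by
      push_cast
      exact PySem.List.pyRange_one_succ_right (by positivity)
    rw [hsplit, List.foldl_append, ih]
    simp only [List.foldl_cons, List.foldl_nil]
    have hm0 : (0 : Int) ≤ (m : Int) := by positivity
    have hmod0 : 0 ≤ PySem.Int.mod (m : Int) fc := by
      rw [PySem.Int.mod_eq_emod_of_pos hfc]; exact Int.emod_nonneg _ (by omega)
    have hmodfc : PySem.Int.mod (m : Int) fc < fc := by
      rw [PySem.Int.mod_eq_emod_of_pos hfc]; exact Int.emod_lt_of_pos _ hfc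
    rw [modify_map_pyRange fc _ _ _ hmod0 hmodfc]
    apply List.map_congr_left
    intro k hk
    rw [PySem.List.mem_pyRange_one] at hk
    rw [show ((m + 1 : Nat) : Int) = (m : Int) + 1 by push_cast; ring,
      stride_succ fc k (m : Int) hfc hk.1 hk.2 hm0]
    by_cases h : k = PySem.Int.mod (m : Int) fc
    · rw [if_pos h, if_pos h.symm]
    · rw [if_neg h, if_neg (fun h' => h h'.symm)]
      simp

-- ===== VERDICT (by name: the statement is the Claim_ definition above) =====
theorem make_outer_folds_py_spec : Claim_equal_make_outer_folds_py := by
  intro n spec _ hpre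
  unfold Spec_make_outer_folds_py make_outer_folds_py make_outer_folds_py_alt
  by_cases hloo : spec = "loo"
  · -- loo: A's singleton comprehension = B's strided folds with fold_count = n
    rw [if_pos hloo]
    simp only [if_pos hloo]
    apply List.map_congr_left
    intro k hk
    rw [PySem.List.mem_pyRange_one] at hk
    exact (stride_singleton n k hk.1 hk.2).symm
  · rw [if_neg hloo]
    simp only [if_neg hloo]
    rcases hpre with h | ⟨hsome, h2, hn⟩
    · exact absurd h hloo
    obtain ⟨fc, hof⟩ := Option.isSome_iff_exists.mp hsome
    rw [hof] at h2 hn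
    simp only [Option.getD_some] at h2 hn
    have hok : ¬ (fc < 2 ∨ n < fc) := by omega
    rw [hof]
    simp only [if_neg hok]
    have hfc : 0 < fc := by omega
    have hcast : ((n.toNat : Int)) = n := by omega
    calc (PySem.List.pyRange 0 n 1).foldl
            (fun folds idx => folds.modify (PySem.Int.mod idx fc).toNat (· ++ [idx]))
            ((PySem.List.pyRange 0 fc 1).map (fun _ => ([] : List Int)))
        = (PySem.List.pyRange 0 (n.toNat : Int) 1).foldl
            (fun folds idx => folds.modify (PySem.Int.mod idx fc).toNat (· ++ [idx]))
            ((PySem.List.pyRange 0 fc 1).map (fun _ => ([] : List Int))) := by rw [hcast]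
      _ = (PySem.List.pyRange 0 fc 1).map (fun k => PySem.List.pyRange k (n.toNat : Int) fc) :=
            loopA_inv fc hfc n.toNat
      _ = (PySem.List.pyRange 0 fc 1).map (fun k => PySem.List.pyRange k n fc) := by rw [hcast]
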